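-- pv_equiv track=rewrite | github.com/madinaliiyeva/password-security-toolkit | src/analyzer.py | describe_charset
-- ===== SOURCE A (Python) =====
-- import string
--
-- def describe_charset (password: str) -> str:
--     """
--     Returns a human-readable description of the character types present in the password.
--     """
--     types = []
--     if any(c in string.ascii_lowercase for c in password):
--         types.append("lowercase")
--     if any(c in string.ascii_uppercase for c in password):
--         types.append("uppercase")
--     if any(c in string.digits for c in password):
--         types.append("digits")
--     if any(c in string.punctuation for c in password):
--         types.append("symbols")
--     return ", ".join(types) if types else "none"
-- ===== SOURCE B (Python) =====
-- def describe_charset(password: str) -> str: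
--     """Single-pass: classify each character once into a found-set, then emit in fixed order."""
--     found = set()
--     for c in password:
--         if 'a' <= c <= 'z':
--             found.add("lowercase")
--         elif 'A' <= c <= 'Z':
--             found.add("uppercase")
--         elif '0' <= c <= '9':
--             found.add("digits")
--         elif 33 <= ord(c) <= 126:
--             found.add("symbols")
--     labels = [t for t in ("lowercase", "uppercase", "digits", "symbols") if t in found]
--     return ", ".join(labels) if labels else "none"
-- ===== Notes on version B (the rewrite author's own statement) =====
-- stated objective: faster
-- what changed: Replaces A's four separate any() scans of the password (one per category) by a single pass that classifies each character once into a found-set via a chain of range comparisons (no membership tests against category strings), then emits the labels in the fixed order from the set.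
import Mathlib
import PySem

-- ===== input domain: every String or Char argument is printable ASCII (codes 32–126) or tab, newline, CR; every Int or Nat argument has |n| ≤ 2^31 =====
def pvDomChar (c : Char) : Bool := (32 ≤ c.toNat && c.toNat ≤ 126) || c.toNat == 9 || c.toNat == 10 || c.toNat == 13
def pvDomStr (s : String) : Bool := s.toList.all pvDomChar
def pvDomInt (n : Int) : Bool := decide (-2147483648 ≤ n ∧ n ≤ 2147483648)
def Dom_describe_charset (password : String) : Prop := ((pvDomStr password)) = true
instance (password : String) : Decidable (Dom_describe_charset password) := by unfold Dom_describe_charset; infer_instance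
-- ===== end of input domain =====

-- B replaces A's four any() scans by one classification pass into a found-set; same return value.

-- ===== PORT A =====
-- the module-level constants from Python's `string` (as their character lists)
def pvAsciiLowercase : List Char :=
  ['a','b','c','d','e','f','g','h','i','j','k','l','m','n','o','p','q','r','s','t','u','v','w','x','y','z']
def pvAsciiUppercase : List Char :=
  ['A','B','C','D','E','F','G','H','I','J','K','L','M','N','O','P','Q','R','S','T','U','V','W','X','Y','Z']
def pvDigits : List Char := ['0','1','2','3','4','5','6','7','8','9']
def pvPunctuation : List Char :=
  ['!','"','#','$','%','&','\'','(',')','*','+',',','-','.','/',':',';','<','=','>','?','@','[','\\',']','^','_','`','{','|','}','~']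

def describe_charset (password : String) : String :=
  let cs := password.toList
  let types : List String := []
  let types := if cs.any (fun c => pvAsciiLowercase.contains c) then types ++ ["lowercase"] else types
  let types := if cs.any (fun c => pvAsciiUppercase.contains c) then types ++ ["uppercase"] else types
  let types := if cs.any (fun c => pvDigits.contains c) then types ++ ["digits"] else types
  let types := if cs.any (fun c => pvPunctuation.contains c) then types ++ ["symbols"] else types
  if types.isEmpty then "none" else PySem.Str.join ", " types

-- ===== PORT B =====
-- one classification step per character, accumulating a found-set
def pvClassify (found : PySem.Set String) (c : Char) : PySem.Set String :=
  if 'a' ≤ c ∧ c ≤ 'z' then found.add "lowercase"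
  else if 'A' ≤ c ∧ c ≤ 'Z' then found.add "uppercase"
  else if '0' ≤ c ∧ c ≤ '9' then found.add "digits"
  else if 33 ≤ c.toNat ∧ c.toNat ≤ 126 then found.add "symbols"
  else found

def describe_charset_alt (password : String) : String :=
  let found := password.toList.foldl pvClassify PySem.Set.empty
  let labels := ["lowercase", "uppercase", "digits", "symbols"].filter (fun t => PySem.Set.contains found t)
  if labels.isEmpty then "none" else PySem.Str.join ", " labels

-- ===== PRECONDITION & SPEC =====
def Spec_describe_charset (password : String) (out : String) : Prop := out = describe_charset_alt password
instance (password : String) (out : String) : Decidable (Spec_describe_charset password out) := by unfold Spec_describe_charset; infer_instance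

-- ===== CLAIM (what is proved, stated in full; the proofs are below) =====
def Claim_equal_describe_charset : Prop := ∀ (password : String), Dom_describe_charset password → Spec_describe_charset password (describe_charset password)

-- ===== LEMMAS AND PROOFS =====

-- the char-range tests of B read off the character code
theorem pv_low_iff (c : Char) : ('a' ≤ c ∧ c ≤ 'z') ↔ (97 ≤ c.toNat ∧ c.toNat ≤ 122) := by
  simp only [Char.le_def, UInt32.le_iff_toNat_le, show 'a'.val.toNat = 97 from rfl,
    show 'z'.val.toNat = 122 from rfl]
  exact Iff.rfl
theorem pv_up_iff (c : Char) : ('A' ≤ c ∧ c ≤ 'Z') ↔ (65 ≤ c.toNat ∧ c.toNat ≤ 90) := by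
  simp only [Char.le_def, UInt32.le_iff_toNat_le, show 'A'.val.toNat = 65 from rfl,
    show 'Z'.val.toNat = 90 from rfl]
  exact Iff.rfl
theorem pv_dig_iff (c : Char) : ('0' ≤ c ∧ c ≤ '9') ↔ (48 ≤ c.toNat ∧ c.toNat ≤ 57) := by
  simp only [Char.le_def, UInt32.le_iff_toNat_le, show '0'.val.toNat = 48 from rfl,
    show '9'.val.toNat = 57 from rfl]
  exact Iff.rfl

-- membership in A's category constants, in terms of the character code
theorem pv_lower_mem (c : Char) : c ∈ pvAsciiLowercase ↔ (97 ≤ c.toNat ∧ c.toNat ≤ 122) := by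
  simp [pvAsciiLowercase, Char.ext_iff, UInt32.ext_iff]
  omega
theorem pv_upper_mem (c : Char) : c ∈ pvAsciiUppercase ↔ (65 ≤ c.toNat ∧ c.toNat ≤ 90) := by
  simp [pvAsciiUppercase, Char.ext_iff, UInt32.ext_iff]
  omega
theorem pv_digit_mem (c : Char) : c ∈ pvDigits ↔ (48 ≤ c.toNat ∧ c.toNat ≤ 57) := by
  simp [pvDigits, Char.ext_iff, UInt32.ext_iff]
  omega
theorem pv_punct_mem (c : Char) : c ∈ pvPunctuation ↔
    (33 ≤ c.toNat ∧ c.toNat ≤ 126 ∧ ¬(97 ≤ c.toNat ∧ c.toNat ≤ 122) ∧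
     ¬(65 ≤ c.toNat ∧ c.toNat ≤ 90) ∧ ¬(48 ≤ c.toNat ∧ c.toNat ≤ 57)) := by
  simp [pvPunctuation, Char.ext_iff, UInt32.ext_iff]
  omega

-- one classification step adds exactly the labels of the categories the character belongs to
theorem pvClassify_mem (s : PySem.Set String) (c : Char) :
    ("lowercase" ∈ pvClassify s c ↔ "lowercase" ∈ s ∨ c ∈ pvAsciiLowercase) ∧
    ("uppercase" ∈ pvClassify s c ↔ "uppercase" ∈ s ∨ c ∈ pvAsciiUppercase) ∧
    ("digits" ∈ pvClassify s c ↔ "digits" ∈ s ∨ c ∈ pvDigits) ∧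
    ("symbols" ∈ pvClassify s c ↔ "symbols" ∈ s ∨ c ∈ pvPunctuation) := by
  rw [pv_lower_mem, pv_upper_mem, pv_digit_mem, pv_punct_mem]
  unfold pvClassify
  split_ifs with h1 h2 h3 h4
  · rw [pv_low_iff] at h1
    refine ⟨?_, ?_, ?_, ?_⟩ <;>
      [ (have hp : 97 ≤ c.toNat ∧ c.toNat ≤ 122 := h1);
        (have hp : ¬(65 ≤ c.toNat ∧ c.toNat ≤ 90) := by omega);
        (have hp : ¬(48 ≤ c.toNat ∧ c.toNat ≤ 57) := by omega);
        (have hp : ¬(33 ≤ c.toNat ∧ c.toNat ≤ 126 ∧ ¬(97 ≤ c.toNat ∧ c.toNat ≤ 122) ∧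
          ¬(65 ≤ c.toNat ∧ c.toNat ≤ 90) ∧ ¬(48 ≤ c.toNat ∧ c.toNat ≤ 57)) := by omega)] <;>
      simp [PySem.Set.mem_add, hp] <;> omega
  · rw [pv_low_iff] at h1; rw [pv_up_iff] at h2
    refine ⟨?_, ?_, ?_, ?_⟩ <;>
      [ (have hp : ¬(97 ≤ c.toNat ∧ c.toNat ≤ 122) := h1);
        (have hp : 65 ≤ c.toNat ∧ c.toNat ≤ 90 := h2);
        (have hp : ¬(48 ≤ c.toNat ∧ c.toNat ≤ 57) := by omega);
        (have hp : ¬(33 ≤ c.toNat ∧ c.toNat ≤ 126 ∧ ¬(97 ≤ c.toNat ∧ c.toNat ≤ 122) ∧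
          ¬(65 ≤ c.toNat ∧ c.toNat ≤ 90) ∧ ¬(48 ≤ c.toNat ∧ c.toNat ≤ 57)) := by omega)] <;>
      simp [PySem.Set.mem_add, hp] <;> omega
  · rw [pv_low_iff] at h1; rw [pv_up_iff] at h2; rw [pv_dig_iff] at h3
    refine ⟨?_, ?_, ?_, ?_⟩ <;>
      [ (have hp : ¬(97 ≤ c.toNat ∧ c.toNat ≤ 122) := h1);
        (have hp : ¬(65 ≤ c.toNat ∧ c.toNat ≤ 90) := h2);
        (have hp : 48 ≤ c.toNat ∧ c.toNat ≤ 57 := h3);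
        (have hp : ¬(33 ≤ c.toNat ∧ c.toNat ≤ 126 ∧ ¬(97 ≤ c.toNat ∧ c.toNat ≤ 122) ∧
          ¬(65 ≤ c.toNat ∧ c.toNat ≤ 90) ∧ ¬(48 ≤ c.toNat ∧ c.toNat ≤ 57)) := by omega)] <;>
      simp [PySem.Set.mem_add, hp] <;> omega
  · rw [pv_low_iff] at h1; rw [pv_up_iff] at h2; rw [pv_dig_iff] at h3
    refine ⟨?_, ?_, ?_, ?_⟩ <;>
      [ (have hp : ¬(97 ≤ c.toNat ∧ c.toNat ≤ 122) := h1);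
        (have hp : ¬(65 ≤ c.toNat ∧ c.toNat ≤ 90) := h2);
        (have hp : ¬(48 ≤ c.toNat ∧ c.toNat ≤ 57) := h3);
        (have hp : (33 ≤ c.toNat ∧ c.toNat ≤ 126 ∧ ¬(97 ≤ c.toNat ∧ c.toNat ≤ 122) ∧
          ¬(65 ≤ c.toNat ∧ c.toNat ≤ 90) ∧ ¬(48 ≤ c.toNat ∧ c.toNat ≤ 57)) :=
            ⟨h4.1, h4.2, h1, h2, h3⟩)] <;>
      simp [PySem.Set.mem_add, hp]
  · rw [pv_low_iff] at h1; rw [pv_up_iff] at h2; rw [pv_dig_iff] at h3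
    refine ⟨?_, ?_, ?_, ?_⟩ <;>
      [ (have hp : ¬(97 ≤ c.toNat ∧ c.toNat ≤ 122) := h1);
        (have hp : ¬(65 ≤ c.toNat ∧ c.toNat ≤ 90) := h2);
        (have hp : ¬(48 ≤ c.toNat ∧ c.toNat ≤ 57) := h3);
        (have hp : ¬(33 ≤ c.toNat ∧ c.toNat ≤ 126 ∧ ¬(97 ≤ c.toNat ∧ c.toNat ≤ 122) ∧
          ¬(65 ≤ c.toNat ∧ c.toNat ≤ 90) ∧ ¬(48 ≤ c.toNat ∧ c.toNat ≤ 57)) := by omega)] <;>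
      simp [hp] <;> omega

-- a label is in the found-set after B's pass iff some character of the password is in its category
theorem pv_found_mem (cs : List Char) (s : PySem.Set String) :
    ("lowercase" ∈ cs.foldl pvClassify s ↔ "lowercase" ∈ s ∨ ∃ c ∈ cs, c ∈ pvAsciiLowercase) ∧
    ("uppercase" ∈ cs.foldl pvClassify s ↔ "uppercase" ∈ s ∨ ∃ c ∈ cs, c ∈ pvAsciiUppercase) ∧
    ("digits" ∈ cs.foldl pvClassify s ↔ "digits" ∈ s ∨ ∃ c ∈ cs, c ∈ pvDigits) ∧
    ("symbols" ∈ cs.foldl pvClassify s ↔ "symbols" ∈ s ∨ ∃ c ∈ cs, c ∈ pvPunctuation) := by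
  induction cs generalizing s with
  | nil => simp
  | cons c rest ih =>
    refine ⟨?_, ?_, ?_, ?_⟩
    · rw [List.foldl_cons, (ih (pvClassify s c)).1, (pvClassify_mem s c).1]
      simp only [List.mem_cons, exists_eq_or_imp]
      tauto
    · rw [List.foldl_cons, (ih (pvClassify s c)).2.1, (pvClassify_mem s c).2.1]
      simp only [List.mem_cons, exists_eq_or_imp]
      tauto
    · rw [List.foldl_cons, (ih (pvClassify s c)).2.2.1, (pvClassify_mem s c).2.2.1]
      simp only [List.mem_cons, exists_eq_or_imp]
      tauto
    · rw [List.foldl_cons, (ih (pvClassify s c)).2.2.2, (pvClassify_mem s c).2.2.2]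
      simp only [List.mem_cons, exists_eq_or_imp]
      tauto

-- ===== VERDICT (by name: the statement is the Claim_ definition above) =====
theorem describe_charset_spec : Claim_equal_describe_charset := by
  intro password _
  unfold Spec_describe_charset describe_charset describe_charset_alt
  have hmem := pv_found_mem password.toList PySem.Set.empty
  simp only [PySem.Set.empty, List.not_mem_nil, false_or] at hmem
  by_cases PL : ∃ c ∈ password.toList, c ∈ pvAsciiLowercase <;>
  by_cases PU : ∃ c ∈ password.toList, c ∈ pvAsciiUppercase <;>
  by_cases PD : ∃ c ∈ password.toList, c ∈ pvDigits <;>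
  by_cases PS : ∃ c ∈ password.toList, c ∈ pvPunctuation <;>
    simp [List.filter, List.any_eq_true, PySem.Set.empty,
      hmem.1, hmem.2.1, hmem.2.2.1, hmem.2.2.2, PL, PU, PD, PS]
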